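-- pv_equiv track=rewrite | github.com/tsyu12345/Paiza-Python-SkillCheck | B068.py | split_chocolate
-- ===== SOURCE A (Python) =====
-- def add_name(l: list[str], name: str, count: int) -> list[str]:
--     """
--     nameをcount回追加したリストを返す
--     """
--     for i in range(count):
--         l.append(name)
--     return l
--
-- def split_chocolate(row_data: list[int], first_inspector: str, second_inspector: str) -> list[str]:
--     """
--     1行分の、均等割りを計算し、分割結果を返す
--     """
--     result: list[str] = []
--     current_suger_sum = 0
--     for i, choco in enumerate(row_data):
--         current_suger_sum += choco
--         #currentの値と残りすべての値の差分を計算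
--         diff = abs(current_suger_sum - sum(row_data[i+1:]))
--         if diff == 0: #均等に分割できた場合
--             #読み込んでいるindexまでをfirst_inspector割り当て
--             result = add_name(result, first_inspector, i+1)
--             #残りをsecond_inspector割り当て
--             result = add_name(result, second_inspector, len(row_data) - (i+1))
--             break
--         else:
--             pass
--     return result
-- ===== SOURCE B (Python) =====
-- def split_chocolate(row_data: list[int], first_inspector: str, second_inspector: str) -> list[str]:
--     total = sum(row_data)
--     prefix = 0
--     for i, choco in enumerate(row_data):
--         prefix += choco
--         if 2 * prefix == total:
--             return [first_inspector] * (i + 1) + [second_inspector] * (len(row_data) - i - 1)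
--     return []
-- ===== Notes on version B (the rewrite author's own statement) =====
-- stated objective: faster
-- what changed: Precompute the total sum once and check 2*prefix == total in a single pass, removing A's per-iteration re-summation of the remaining suffix.
import Mathlib
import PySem

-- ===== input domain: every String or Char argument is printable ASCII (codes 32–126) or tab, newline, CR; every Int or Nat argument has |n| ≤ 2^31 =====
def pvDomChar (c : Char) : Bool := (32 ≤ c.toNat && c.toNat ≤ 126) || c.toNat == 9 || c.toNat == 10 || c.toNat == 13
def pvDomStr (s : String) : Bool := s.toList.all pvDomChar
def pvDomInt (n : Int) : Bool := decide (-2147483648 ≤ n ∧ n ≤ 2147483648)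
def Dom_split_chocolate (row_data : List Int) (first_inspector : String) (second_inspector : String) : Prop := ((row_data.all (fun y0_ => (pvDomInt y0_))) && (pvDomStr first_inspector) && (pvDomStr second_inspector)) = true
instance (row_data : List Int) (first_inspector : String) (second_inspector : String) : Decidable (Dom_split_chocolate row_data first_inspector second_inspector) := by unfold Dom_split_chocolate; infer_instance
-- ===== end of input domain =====

-- B replaces A's per-iteration re-summation of the remaining suffix by a precomputed
-- total and the one-pass test 2*prefix == total (objective: faster).
-- ===== PORT A =====
-- add_name: append name count times (for i in range(count): l.append(name))
def addName (l : List String) (name : String) (count : Nat) : List String :=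
  (List.range count).foldl (fun acc _ => acc ++ [name]) l

-- the for-loop of A: iterates over row_data with index i and running sum
def loopA (orig : List Int) (f s : String) : List Int → Nat → Int → List String
  | [], _, _ => []
  | choco :: rest, i, cur =>
    let cur' := cur + choco
    let diff := (cur' - (PySem.List.slice orig (some ((i : Int) + 1)) none).sum).natAbs
    if diff = 0 then
      addName (addName [] f (i + 1)) s (orig.length - (i + 1))
    else
      loopA orig f s rest (i + 1) cur'

def split_chocolate (row_data : List Int) (first_inspector : String) (second_inspector : String) : List String :=
  loopA row_data first_inspector second_inspector row_data 0 0

-- ===== PORT B =====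
-- the for-loop of B: single pass comparing 2*prefix with the precomputed total
def loopB (total : Int) (n : Nat) (f s : String) : List Int → Nat → Int → List String
  | [], _, _ => []
  | choco :: rest, i, pref =>
    let p := pref + choco
    if 2 * p = total then
      List.replicate (i + 1) f ++ List.replicate (n - (i + 1)) s
    else
      loopB total n f s rest (i + 1) p

def split_chocolate_alt (row_data : List Int) (first_inspector : String) (second_inspector : String) : List String :=
  loopB row_data.sum row_data.length first_inspector second_inspector row_data 0 0

-- ===== PRECONDITION & SPEC =====
def Spec_split_chocolate (row_data : List Int) (first_inspector : String) (second_inspector : String) (out : List String) : Prop := out = split_chocolate_alt row_data first_inspector second_inspector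
instance (row_data : List Int) (first_inspector : String) (second_inspector : String) (out : List String) : Decidable (Spec_split_chocolate row_data first_inspector second_inspector out) := by unfold Spec_split_chocolate; infer_instance

-- ===== CLAIM (what is proved, stated in full; the proofs are below) =====
def Claim_equal_split_chocolate : Prop := ∀ (row_data : List Int) (first_inspector : String) (second_inspector : String), Dom_split_chocolate row_data first_inspector second_inspector → Spec_split_chocolate row_data first_inspector second_inspector (split_chocolate row_data first_inspector second_inspector)

-- ===== LEMMAS AND PROOFS =====
lemma addName_eq (l : List String) (name : String) (count : Nat) :
    addName l name count = l ++ List.replicate count name := by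
  induction count with
  | zero => simp [addName]
  | succ k ih =>
      simp only [addName, List.range_succ, List.foldl_append] at *
      simp [ih, List.replicate_succ']

lemma loop_eq (f s : String) :
    ∀ (rest pre : List Int),
      loopA (pre ++ rest) f s rest pre.length pre.sum
        = loopB (pre ++ rest).sum (pre ++ rest).length f s rest pre.length pre.sum := by
  intro rest
  induction rest with
  | nil => intro pre; rfl
  | cons c rest' ih =>
      intro pre
      have hdrop : PySem.List.slice (pre ++ c :: rest') (some ((pre.length : Int) + 1)) none
          = rest' := by
        have : ((pre.length : Int) + 1) = ((pre.length + 1 : Nat) : Int) := by push_cast; ring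
        rw [this, PySem.List.slice_from_natCast]
        simp
      have hcond : ((pre.sum + c - (PySem.List.slice (pre ++ c :: rest')
            (some ((pre.length : Int) + 1)) none).sum).natAbs = 0)
          ↔ (2 * (pre.sum + c) = (pre ++ c :: rest').sum) := by
        rw [hdrop]; simp; omega
      show loopA (pre ++ c :: rest') f s (c :: rest') pre.length pre.sum = _
      rw [loopA, loopB]
      by_cases h : 2 * (pre.sum + c) = (pre ++ c :: rest').sum
      · rw [if_pos (hcond.mpr h), if_pos h]
        simp [addName_eq]
      · rw [if_neg (fun hc => h (hcond.mp hc)), if_neg h]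
        have := ih (pre ++ [c])
        simpa [List.append_assoc] using this

-- ===== VERDICT (by name: the statement is the Claim_ definition above) =====
theorem split_chocolate_spec : Claim_equal_split_chocolate := by
  intro row f s _
  unfold Spec_split_chocolate split_chocolate split_chocolate_alt
  simpa using loop_eq f s row []
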